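-- pv_equiv track=rewrite | github.com/cheerfulconnor78/fpga-dnn-accelerator | top/weights_generator/mif_golden_gen_l2.py | relu_scale_pool_layer
-- ===== SOURCE A (Python) =====
-- OUTPUT_SHIFT = 8  # Match your Verilog localparam
--
-- def relu_scale_pool_layer(conv_output, out_dim_conv):
--     """Applies ReLU, Shift, Saturation, and 2x2 MaxPool."""
--     pool_out = []
--     out_dim_pool = out_dim_conv // 2
--
--     # Process 2x2 blocks
--     for r in range(out_dim_pool):
--         for c in range(out_dim_pool):
--             vals = []
--             for pr in range(2):
--                 for pc in range(2):
--                     # Index in the larger conv map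
--                     idx = (r*2 + pr) * out_dim_conv + (c*2 + pc)
--                     val = conv_output[idx]
--
--                     # 1. Scale (Shift)
--                     val = val >> OUTPUT_SHIFT
--
--                     # 2. ReLU
--                     if val < 0: val = 0
--
--                     # 3. Saturate (Clip to 127)
--                     if val > 127: val = 127
--
--                     vals.append(val)
--             # 4. MaxPool
--             pool_out.append(max(vals))
--     return pool_out
-- ===== SOURCE B (Python) =====
-- OUTPUT_SHIFT = 8  # Match your Verilog localparam
--
-- def relu_scale_pool_layer(conv_output, out_dim_conv):
--     """Applies ReLU, Shift, Saturation, and 2x2 MaxPool.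
--
--     Per 2x2 block: take the max of the four raw conv values first, then apply
--     shift/ReLU/saturate once to that max (the transform is monotone
--     non-decreasing, so this equals the max of the transformed values)."""
--     pool_out = []
--     out_dim_pool = out_dim_conv // 2
--     for r in range(out_dim_pool):
--         base_row = r * 2 * out_dim_conv
--         for c in range(out_dim_pool):
--             base = base_row + c * 2
--             m = max(conv_output[base], conv_output[base + 1],
--                     conv_output[base + out_dim_conv],
--                     conv_output[base + out_dim_conv + 1])
--             v = m >> OUTPUT_SHIFT
--             if v < 0:
--                 v = 0
--             elif v > 127:
--                 v = 127
--             pool_out.append(v)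
--     return pool_out
-- ===== Notes on version B (the rewrite author's own statement) =====
-- stated objective: simpler
-- what changed: B removes the 2x2 pr/pc inner loops and the per-element transform: it takes the max of the four raw conv values of each block directly and applies the shift/ReLU/saturate clamp once to that max (the transform is monotone non-decreasing), instead of transforming all four values into a list and maxing the list.
import Mathlib
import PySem

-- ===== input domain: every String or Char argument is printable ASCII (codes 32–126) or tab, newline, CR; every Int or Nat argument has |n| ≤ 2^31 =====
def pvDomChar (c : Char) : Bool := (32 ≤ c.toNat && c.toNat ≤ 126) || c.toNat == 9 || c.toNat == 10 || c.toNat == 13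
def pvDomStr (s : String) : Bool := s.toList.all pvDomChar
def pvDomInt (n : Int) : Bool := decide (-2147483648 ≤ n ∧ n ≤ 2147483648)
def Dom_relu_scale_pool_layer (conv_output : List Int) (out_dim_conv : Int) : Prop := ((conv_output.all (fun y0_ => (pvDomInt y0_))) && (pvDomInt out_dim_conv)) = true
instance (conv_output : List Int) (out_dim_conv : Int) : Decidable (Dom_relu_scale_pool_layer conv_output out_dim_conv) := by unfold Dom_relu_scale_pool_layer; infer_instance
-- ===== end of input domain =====

-- B computes each 2x2 block's max of the RAW conv values first and applies the
-- shift/ReLU/saturate transform once to that max (the transform is monotone), instead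
-- of transforming all four values and maxing them; objective: simpler (4x fewer transforms).

-- ===== PORT A =====
def relu_scale_pool_layer (conv_output : List Int) (out_dim_conv : Int) : List Int :=
  let out_dim_pool := PySem.Int.floordiv out_dim_conv 2
  (PySem.List.pyRange 0 out_dim_pool 1).foldl (fun pool_out r =>
    (PySem.List.pyRange 0 out_dim_pool 1).foldl (fun pool_out c =>
      let vals : List Int :=
        (PySem.List.pyRange 0 2 1).foldl (fun vals pr =>
          (PySem.List.pyRange 0 2 1).foldl (fun vals pc =>
            let idx := (r * 2 + pr) * out_dim_conv + (c * 2 + pc)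
            -- conv_output[idx]: Pre_ excludes the IndexError inputs, so the default is never read
            let val := PySem.List.pyGetD conv_output idx 0
            let val := val >>> (8 : Nat)          -- val >> OUTPUT_SHIFT (Python's arithmetic shift)
            let val := if val < 0 then 0 else val
            let val := if val > 127 then 127 else val
            vals ++ [val]) vals) []
      pool_out ++ [(PySem.List.max? vals (fun v => v)).getD 0]) pool_out) []

-- ===== PORT B =====
def relu_scale_pool_layer_alt (conv_output : List Int) (out_dim_conv : Int) : List Int :=
  let out_dim_pool := PySem.Int.floordiv out_dim_conv 2
  (PySem.List.pyRange 0 out_dim_pool 1).foldl (fun pool_out r =>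
    let base_row := r * 2 * out_dim_conv
    (PySem.List.pyRange 0 out_dim_pool 1).foldl (fun pool_out c =>
      let base := base_row + c * 2
      -- max(a, b, c, d) on ints = left-nested binary max
      let m := max (max (max (PySem.List.pyGetD conv_output base 0)
                             (PySem.List.pyGetD conv_output (base + 1) 0))
                        (PySem.List.pyGetD conv_output (base + out_dim_conv) 0))
                   (PySem.List.pyGetD conv_output (base + out_dim_conv + 1) 0)
      let v := m >>> (8 : Nat)
      let v := if v < 0 then 0 else if v > 127 then 127 else v
      pool_out ++ [v]) pool_out) []

-- ===== PRECONDITION & SPEC =====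
-- Pre_ excludes exactly the inputs on which A raises IndexError: a positive pooled
-- dimension whose largest accessed index (2p-1)*out_dim_conv + (2p-1) is not inside conv_output.
def Pre_relu_scale_pool_layer (conv_output : List Int) (out_dim_conv : Int) : Prop :=
  PySem.Int.floordiv out_dim_conv 2 ≤ 0 ∨
    (2 * PySem.Int.floordiv out_dim_conv 2 - 1) * out_dim_conv +
      (2 * PySem.Int.floordiv out_dim_conv 2 - 1) < (conv_output.length : Int)
instance (conv_output : List Int) (out_dim_conv : Int) : Decidable (Pre_relu_scale_pool_layer conv_output out_dim_conv) := by unfold Pre_relu_scale_pool_layer; infer_instance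

def pvWitness_relu_scale_pool_layer : List Int × Int := ([300, 0, -5, 100000], 2)

def Spec_relu_scale_pool_layer (conv_output : List Int) (out_dim_conv : Int) (out : List Int) : Prop := out = relu_scale_pool_layer_alt conv_output out_dim_conv
instance (conv_output : List Int) (out_dim_conv : Int) (out : List Int) : Decidable (Spec_relu_scale_pool_layer conv_output out_dim_conv out) := by unfold Spec_relu_scale_pool_layer; infer_instance

-- ===== CLAIM (what is proved, stated in full; the proofs are below) =====
def Claim_equal_relu_scale_pool_layer : Prop := ∀ (conv_output : List Int) (out_dim_conv : Int), Dom_relu_scale_pool_layer conv_output out_dim_conv → Pre_relu_scale_pool_layer conv_output out_dim_conv → Spec_relu_scale_pool_layer conv_output out_dim_conv (relu_scale_pool_layer conv_output out_dim_conv)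

-- ===== LEMMAS AND PROOFS =====

-- shifting right by 8 (floor) is monotone
theorem pvShift_mono {a b : Int} (h : a ≤ b) : a >>> (8 : Nat) ≤ b >>> (8 : Nat) := by
  simp only [Int.shiftRight_eq_div_pow]
  exact Int.ediv_le_ediv (by norm_num) h

-- shift commutes with max (monotone map)
theorem pvShift_max (a b : Int) : (max a b) >>> (8 : Nat) = max (a >>> (8 : Nat)) (b >>> (8 : Nat)) := by
  rcases le_total a b with h | h
  · rw [max_eq_right h, max_eq_right (pvShift_mono h)]
  · rw [max_eq_left h, max_eq_left (pvShift_mono h)]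

-- A's ReLU-then-saturate chain equals B's single if/elif clamp
theorem pvClamp_eq (s : Int) :
    (if (if s < 0 then 0 else s) > 127 then 127 else if s < 0 then 0 else s) =
    (if s < 0 then (0:Int) else if s > 127 then 127 else s) := by
  split_ifs <;> omega

-- the clamp commutes with max
theorem pvClamp_max (s t : Int) :
    (if max s t < 0 then (0:Int) else if max s t > 127 then 127 else max s t) =
    max (if s < 0 then (0:Int) else if s > 127 then 127 else s)
        (if t < 0 then (0:Int) else if t > 127 then 127 else t) := by
  split_ifs <;> omega

theorem pvList4 {α : Type} (x1 x2 x3 x4 : α) :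
    ([] : List α) ++ [x1] ++ [x2] ++ [x3] ++ [x4] = [x1, x2, x3, x4] := by simp

-- Python's max over a 4-element int list (first-extremal fold) is the nested binary max
theorem pvMax4 (t1 t2 t3 t4 : Int) :
    (PySem.List.max? [t1, t2, t3, t4] (fun v => v)).getD 0 = max (max (max t1 t2) t3) t4 := by
  simp only [PySem.List.max?]
  have k : ∀ m x : Int, (if m < x then some x else some m) = some (max m x) := by
    intro m x; split_ifs with h
    · rw [max_eq_right h.le]
    · rw [max_eq_left (le_of_not_gt h)]
  simp only [List.foldl, k, Option.getD_some]

-- ===== VERDICT (by name: the statement is the Claim_ definition above) =====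
theorem relu_scale_pool_layer_spec : Claim_equal_relu_scale_pool_layer := by
  intro conv d _ _
  unfold Spec_relu_scale_pool_layer relu_scale_pool_layer relu_scale_pool_layer_alt
  refine PySem.List.foldl_congr_mem _ _ _ _ ?_
  intro pool r _
  refine PySem.List.foldl_congr_mem _ _ _ _ ?_
  intro pool' c _
  simp only []
  congr 1
  have h2 : PySem.List.pyRange 0 2 1 = [0, 1] := by decide
  simp only [h2, List.foldl]
  -- align B's index arithmetic with A's
  have e00 : (r * 2 + 0) * d + (c * 2 + 0) = r * 2 * d + c * 2 := by ring
  have e01 : (r * 2 + 0) * d + (c * 2 + 1) = r * 2 * d + c * 2 + 1 := by ring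
  have e10 : (r * 2 + 1) * d + (c * 2 + 0) = r * 2 * d + c * 2 + d := by ring
  have e11 : (r * 2 + 1) * d + (c * 2 + 1) = r * 2 * d + c * 2 + d + 1 := by ring
  rw [e00, e01, e10, e11]
  generalize PySem.List.pyGetD conv (r * 2 * d + c * 2) 0 = a
  generalize PySem.List.pyGetD conv (r * 2 * d + c * 2 + 1) 0 = b
  generalize PySem.List.pyGetD conv (r * 2 * d + c * 2 + d) 0 = a2
  generalize PySem.List.pyGetD conv (r * 2 * d + c * 2 + d + 1) 0 = b2
  rw [pvList4, pvMax4, pvClamp_eq, pvClamp_eq, pvClamp_eq, pvClamp_eq,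
      pvShift_max, pvShift_max, pvShift_max, pvClamp_max, pvClamp_max, pvClamp_max]
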